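-- pv_equiv track=rewrite | github.com/brettamartin7/Midio | main.py | to_chord
-- ===== SOURCE A (Python) =====
-- key_note_dict = {
--     0: "C",
--     1: "C#/Db",
--     2: "D",
--     3: "D#/Eb",
--     4: "E",
--     5: "F",
--     6: "F#/Gb",
--     7: "G",
--     8: "G#/Ab",
--     9: "A",
--     10: "A#/Bb",
--     11: "B",
-- }
--
-- note_chord_dict = {
--     # Major
--     frozenset({"C", "E", "G"}): "C",
--     frozenset({"C#/Db", "E#", "G#/Ab"}): "C# major",
--     frozenset({"D", "F#", "A"}): "D major",
--     frozenset({"D#/Eb", "G", "A#/Bb"}): "Eb major",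
--     frozenset({"E", "G#", "B"}): "E major",
--     frozenset({"F", "A", "C"}): "F major",
--     frozenset({"F#/Gb", "A#/Bb", "C#/Db"}): "F# major",
--     frozenset({"G", "B", "D"}): "G major",
--     frozenset({"G#/Ab", "C", "D#/Eb"}): "Ab major",
--     frozenset({"A", "C#/Db", "E"}): "A major",
--     frozenset({"A#/Bb", "D", "F"}): "Bb major",
--     frozenset({"B", "D#/Eb", "F#/Gb"}): "B major",
--     # Minor
--     frozenset({"C", "D#/Eb", "G"}): "C minor",
--     frozenset({"C#/Db", "E", "G#/Ab"}): "C# minor",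
--     frozenset({"D", "F", "A"}): "D minor",
--     frozenset({"D#/Eb", "F#/Gb", "Bb"}): "Eb minor",
--     frozenset({"E", "G", "B"}): "E minor",
--     frozenset({"F", "G#/Ab", "C"}): "F minor",
--     frozenset({"F#/Gb", "A", "C#/Db"}): "F# minor",
--     frozenset({"G", "A#/Bb", "D"}): "G minor",
--     frozenset({"G#/Ab", "B", "D#/Eb"}): "Ab minor",
--     frozenset({"A", "C", "E"}): "A minor",
--     frozenset({"A#/Bb", "C#/Db", "F"}): "Bb minor",
--     frozenset({"B", "D", "F#/Gb"}): "B minor"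
-- }
--
-- def to_note(input_key: int):
--     base_value = input_key % 12  # Convert key to base value for the note
--     return key_note_dict.get(base_value, "invalid_key: {0}".format(input_key))
--
-- def to_chord(active_keys: frozenset):
--     base_values = frozenset({to_note(key) for key in active_keys})
--     chord = ""
--     try:
--         chord = note_chord_dict[base_values]
--     except KeyError:
--         return "Invalid chord"
--
--     return chord
-- ===== SOURCE B (Python) =====
-- _NOTE = ["C", "C#", "D", "Eb", "E", "F", "F#", "G", "Ab", "A", "Bb", "B"]
--
-- def to_chord(active_keys):
--     pcs = {k % 12 for k in active_keys}
--     if len(pcs) == 3: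
--         for r in sorted(pcs):
--             if (r + 4) % 12 in pcs and (r + 7) % 12 in pcs:
--                 return _NOTE[r] if r == 0 else _NOTE[r] + " major"
--             if (r + 3) % 12 in pcs and (r + 7) % 12 in pcs:
--                 return _NOTE[r] + " minor"
--     return "Invalid chord"
-- ===== Notes on version B (the rewrite author's own statement) =====
-- stated objective: alternative
-- what changed: B has no chord table at all: it reduces the keys to the set of pitch classes and recognises the chord arithmetically, scanning the sorted pitch classes for a root whose major-third-plus-fifth or minor-third-plus-fifth interval pattern lies in the set, instead of A's per-key note-name string conversion followed by a frozenset-of-strings lookup in a 24-entry dict.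
-- intended difference: On inputs whose pitch classes form the C# major {1,5,8}, D major {2,6,9}, E major {4,8,11} or Eb minor {3,6,10} triad, A returns 'Invalid chord' because its table spells those entries with note names ('E#', 'F#', 'G#', 'Bb') that to_note never produces, while B returns the chord name ('C# major', 'D major', 'E major', 'Eb minor'), which is the intended value. — e.g. on to_chord([1, 5, 8]): A returns "Invalid chord", B returns "C# major"
import Mathlib
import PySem

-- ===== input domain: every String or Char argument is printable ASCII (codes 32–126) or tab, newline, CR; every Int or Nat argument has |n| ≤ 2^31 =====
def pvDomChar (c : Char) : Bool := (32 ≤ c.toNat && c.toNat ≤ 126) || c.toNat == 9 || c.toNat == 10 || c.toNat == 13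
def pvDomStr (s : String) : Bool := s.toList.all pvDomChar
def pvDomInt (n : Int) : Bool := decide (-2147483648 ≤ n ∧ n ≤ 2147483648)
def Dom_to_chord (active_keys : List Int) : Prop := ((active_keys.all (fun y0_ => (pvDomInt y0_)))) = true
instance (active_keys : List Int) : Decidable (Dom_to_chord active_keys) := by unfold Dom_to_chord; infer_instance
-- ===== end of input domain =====

-- B drops the note-name table entirely: it recognises the chord arithmetically, scanning the
-- pitch-class set for a root whose major/minor interval pattern (+4/+7 or +3/+7) lies in the set;
-- on four triads whose entries in A's table carry misspelled note names, B returns the chord name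
-- where A returns "Invalid chord".

-- ===== PORT A =====
def keyNoteDict : PySem.Dict Int String := ⟨[
  (0, "C"), (1, "C#/Db"), (2, "D"), (3, "D#/Eb"), (4, "E"), (5, "F"),
  (6, "F#/Gb"), (7, "G"), (8, "G#/Ab"), (9, "A"), (10, "A#/Bb"), (11, "B")]⟩

def to_note (input_key : Int) : String :=
  let base_value := PySem.Int.mod input_key 12
  PySem.Dict.getD keyNoteDict base_value ("invalid_key: " ++ PySem.Int.toStr input_key)

-- note_chord_dict has frozenset keys, so its lookup is ported by hand: an association list of
-- set-valued keys (all distinct as sets), looked up by set equality — exactly a CPython dict hit.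
def noteChordDict : List (PySem.Set String × String) := [
  (PySem.Set.ofList ["C", "E", "G"], "C"),
  (PySem.Set.ofList ["C#/Db", "E#", "G#/Ab"], "C# major"),
  (PySem.Set.ofList ["D", "F#", "A"], "D major"),
  (PySem.Set.ofList ["D#/Eb", "G", "A#/Bb"], "Eb major"),
  (PySem.Set.ofList ["E", "G#", "B"], "E major"),
  (PySem.Set.ofList ["F", "A", "C"], "F major"),
  (PySem.Set.ofList ["F#/Gb", "A#/Bb", "C#/Db"], "F# major"),
  (PySem.Set.ofList ["G", "B", "D"], "G major"),
  (PySem.Set.ofList ["G#/Ab", "C", "D#/Eb"], "Ab major"),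
  (PySem.Set.ofList ["A", "C#/Db", "E"], "A major"),
  (PySem.Set.ofList ["A#/Bb", "D", "F"], "Bb major"),
  (PySem.Set.ofList ["B", "D#/Eb", "F#/Gb"], "B major"),
  (PySem.Set.ofList ["C", "D#/Eb", "G"], "C minor"),
  (PySem.Set.ofList ["C#/Db", "E", "G#/Ab"], "C# minor"),
  (PySem.Set.ofList ["D", "F", "A"], "D minor"),
  (PySem.Set.ofList ["D#/Eb", "F#/Gb", "Bb"], "Eb minor"),
  (PySem.Set.ofList ["E", "G", "B"], "E minor"),
  (PySem.Set.ofList ["F", "G#/Ab", "C"], "F minor"),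
  (PySem.Set.ofList ["F#/Gb", "A", "C#/Db"], "F# minor"),
  (PySem.Set.ofList ["G", "A#/Bb", "D"], "G minor"),
  (PySem.Set.ofList ["G#/Ab", "B", "D#/Eb"], "Ab minor"),
  (PySem.Set.ofList ["A", "C", "E"], "A minor"),
  (PySem.Set.ofList ["A#/Bb", "C#/Db", "F"], "Bb minor"),
  (PySem.Set.ofList ["B", "D", "F#/Gb"], "B minor")]

def lookupChord : List (PySem.Set String × String) → PySem.Set String → Option String
  | [], _ => none
  | (k, v) :: rest, s => if PySem.Set.equal k s then some v else lookupChord rest s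

def to_chord (active_keys : List Int) : String :=
  let base_values : PySem.Set String := PySem.Set.ofList (active_keys.map to_note)
  match lookupChord noteChordDict base_values with
  | some chord => chord
  | none => "Invalid chord"

-- ===== PORT B =====
def noteNames : List String :=
  ["C", "C#", "D", "Eb", "E", "F", "F#", "G", "Ab", "A", "Bb", "B"]

-- the 'for r in sorted(pcs)' loop of Source B (sorted iteration: the set's hash order is not modelled,
-- and the sorted order is what Source B iterates)
def chordLoop (pcs : PySem.Set Int) : List Int → String
  | [] => "Invalid chord"
  | r :: rest =>
    if PySem.Set.contains pcs (PySem.Int.mod (r + 4) 12) && PySem.Set.contains pcs (PySem.Int.mod (r + 7) 12) then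
      (if r == 0 then PySem.List.pyGetD noteNames r "" else PySem.List.pyGetD noteNames r "" ++ " major")
    else if PySem.Set.contains pcs (PySem.Int.mod (r + 3) 12) && PySem.Set.contains pcs (PySem.Int.mod (r + 7) 12) then
      PySem.List.pyGetD noteNames r "" ++ " minor"
    else chordLoop pcs rest

def to_chord_alt (active_keys : List Int) : String :=
  let pcs : PySem.Set Int := PySem.Set.ofList (active_keys.map (fun k => PySem.Int.mod k 12))
  if pcs.length == 3 then
    chordLoop pcs (PySem.List.sorted pcs (fun x => x) false)
  else "Invalid chord"

-- ===== PRECONDITION & SPEC =====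
-- On inputs whose pitch classes form the C# major {1,5,8}, D major {2,6,9}, E major {4,8,11} or
-- Eb minor {3,6,10} triad, A returns "Invalid chord" because its table spells those entries with
-- note names ("E#", "F#", "G#", "Bb") that to_note never produces, while B returns the chord name,
-- which is the intended value.
def D_to_chord (active_keys : List Int) : Prop :=
  let pcs : PySem.Set Int := PySem.Set.ofList (active_keys.map (fun k => PySem.Int.mod k 12))
  PySem.Set.equal pcs [1, 5, 8] = true ∨ PySem.Set.equal pcs [2, 6, 9] = true ∨
  PySem.Set.equal pcs [4, 8, 11] = true ∨ PySem.Set.equal pcs [3, 6, 10] = true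
instance (active_keys : List Int) : Decidable (D_to_chord active_keys) := by unfold D_to_chord; infer_instance

def Spec_to_chord (active_keys : List Int) (out : String) : Prop := ¬ D_to_chord active_keys → out = to_chord_alt active_keys
instance (active_keys : List Int) (out : String) : Decidable (Spec_to_chord active_keys out) := by unfold Spec_to_chord; infer_instance

def pvDiffWitness_to_chord : List Int := [1, 5, 8]
def pvDiffWitnessOut_to_chord : String × String := ("Invalid chord", "C# major")

-- ===== CLAIM (what is proved, stated in full; the proofs are below) =====
def Claim_unchanged_to_chord : Prop := ∀ (active_keys : List Int), Dom_to_chord active_keys → Spec_to_chord active_keys (to_chord active_keys)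
def Claim_changed_to_chord : Prop := Dom_to_chord (pvDiffWitness_to_chord) ∧ D_to_chord (pvDiffWitness_to_chord) ∧ to_chord (pvDiffWitness_to_chord) = pvDiffWitnessOut_to_chord.1 ∧ to_chord_alt (pvDiffWitness_to_chord) = pvDiffWitnessOut_to_chord.2 ∧ pvDiffWitnessOut_to_chord.1 ≠ pvDiffWitnessOut_to_chord.2
def Claim_exact_to_chord : Prop := ∀ (active_keys : List Int), Dom_to_chord active_keys → D_to_chord active_keys → to_chord active_keys ≠ to_chord_alt active_keys

-- ===== LEMMAS AND PROOFS =====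

-- the canonical form both programs factor through: the sorted set of pitch classes
def canonPcs (keys : List Int) : List Int :=
  PySem.List.sorted (PySem.Set.ofList (keys.map (fun k => PySem.Int.mod k 12))) (fun x => x) false

def noteName (r : Int) : String := PySem.Dict.getD keyNoteDict r ""

def Aof (t : List Int) : String :=
  match lookupChord noteChordDict (PySem.Set.ofList (t.map noteName)) with
  | some chord => chord
  | none => "Invalid chord"

def Bof (t : List Int) : String :=
  if t.length == 3 then chordLoop t t else "Invalid chord"

def Dcheck (t : List Int) : Bool :=
  PySem.Set.equal t [1, 5, 8] || PySem.Set.equal t [2, 6, 9] ||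
  PySem.Set.equal t [4, 8, 11] || PySem.Set.equal t [3, 6, 10]

def triadCheck (t : List Int) : Bool :=
  decide (Aof t = Bof t) == !Dcheck t

lemma to_note_eq (k : Int) : to_note k = noteName (PySem.Int.mod k 12) := by
  have h1 : 0 ≤ PySem.Int.mod k 12 := PySem.Int.mod_nonneg k (by norm_num)
  have h2 : PySem.Int.mod k 12 < 12 := PySem.Int.mod_lt k (by norm_num)
  unfold to_note noteName
  set r := PySem.Int.mod k 12 with hr
  clear_value r
  interval_cases r <;> rfl

lemma equal_congr {α : Type} [BEq α] [LawfulBEq α] (a b c : PySem.Set α)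
    (h : ∀ x, x ∈ a ↔ x ∈ b) : PySem.Set.equal a c = PySem.Set.equal b c := by
  unfold PySem.Set.equal
  have e1 : PySem.Set.issubset a c = PySem.Set.issubset b c := by
    rw [Bool.eq_iff_iff]; simp only [PySem.Set.issubset_iff]
    constructor <;> intro hh x hx
    · exact hh x ((h x).2 hx)
    · exact hh x ((h x).1 hx)
  have e2 : PySem.Set.issubset c a = PySem.Set.issubset c b := by
    rw [Bool.eq_iff_iff]; simp only [PySem.Set.issubset_iff]
    constructor <;> intro hh x hx
    · exact (h x).1 (hh x hx)
    · exact (h x).2 (hh x hx)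
  rw [e1, e2]

lemma equal_congr_right {α : Type} [BEq α] [LawfulBEq α] (a b c : PySem.Set α)
    (h : ∀ x, x ∈ b ↔ x ∈ c) : PySem.Set.equal a b = PySem.Set.equal a c := by
  rw [Bool.eq_iff_iff]
  simp only [PySem.Set.equal_iff]
  constructor <;> intro hh x
  · exact (hh x).trans (h x)
  · exact (hh x).trans (h x).symm

lemma lookup_congr (tbl : List (PySem.Set String × String)) (s1 s2 : PySem.Set String)
    (h : ∀ x, x ∈ s1 ↔ x ∈ s2) : lookupChord tbl s1 = lookupChord tbl s2 := by
  induction tbl with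
  | nil => rfl
  | cons p rest ih =>
    obtain ⟨k, v⟩ := p
    simp only [lookupChord, equal_congr_right k s1 s2 h, ih]

lemma contains_congr (s1 s2 : PySem.Set Int) (h : ∀ x, x ∈ s1 ↔ x ∈ s2) (x : Int) :
    PySem.Set.contains s1 x = PySem.Set.contains s2 x := by
  rw [Bool.eq_iff_iff, PySem.Set.contains_iff, PySem.Set.contains_iff]
  exact h x

lemma chordLoop_congr (s1 s2 : PySem.Set Int) (h : ∀ x, x ∈ s1 ↔ x ∈ s2) :
    ∀ l : List Int, chordLoop s1 l = chordLoop s2 l := by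
  intro l
  induction l with
  | nil => rfl
  | cons r rest ih =>
    simp only [chordLoop, contains_congr s1 s2 h, ih]

lemma mem_canon_map (keys : List Int) (x : String) :
    x ∈ PySem.Set.ofList (keys.map to_note) ↔ x ∈ PySem.Set.ofList ((canonPcs keys).map noteName) := by
  simp only [PySem.Set.mem_ofList, List.mem_map, canonPcs, PySem.List.mem_sorted, to_note_eq]
  constructor
  · rintro ⟨k, hk, rfl⟩
    exact ⟨_, ⟨k, hk, rfl⟩, rfl⟩
  · rintro ⟨r, ⟨k, hk, rfl⟩, rfl⟩
    exact ⟨k, hk, rfl⟩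

lemma to_chord_eq_Aof (keys : List Int) : to_chord keys = Aof (canonPcs keys) := by
  show (match lookupChord noteChordDict (PySem.Set.ofList (keys.map to_note)) with
        | some chord => chord
        | none => "Invalid chord") = Aof (canonPcs keys)
  rw [lookup_congr noteChordDict _ _ (mem_canon_map keys)]
  rfl

lemma to_chord_alt_eq (keys : List Int) : to_chord_alt keys = Bof (canonPcs keys) := by
  show (if (PySem.Set.ofList (keys.map (fun k => PySem.Int.mod k 12))).length == 3 then
          chordLoop (PySem.Set.ofList (keys.map (fun k => PySem.Int.mod k 12))) (canonPcs keys)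
        else "Invalid chord") = Bof (canonPcs keys)
  have hperm : (canonPcs keys).Perm (PySem.Set.ofList (keys.map (fun k => PySem.Int.mod k 12))) :=
    PySem.List.sorted_perm _ _ _
  have hlen : (canonPcs keys).length = (PySem.Set.ofList (keys.map (fun k => PySem.Int.mod k 12))).length :=
    hperm.length_eq
  have hmem : ∀ x : Int, x ∈ (PySem.Set.ofList (keys.map (fun k => PySem.Int.mod k 12)) : PySem.Set Int) ↔ x ∈ canonPcs keys := by
    intro x; exact (hperm.mem_iff).symm
  unfold Bof
  rw [hlen, chordLoop_congr _ _ hmem]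

lemma D_iff_Dcheck (keys : List Int) : D_to_chord keys ↔ Dcheck (canonPcs keys) = true := by
  have hmem : ∀ x : Int, x ∈ PySem.Set.ofList (keys.map (fun k => PySem.Int.mod k 12)) ↔ x ∈ canonPcs keys := by
    intro x; simp [canonPcs, PySem.List.mem_sorted]
  show (PySem.Set.equal (PySem.Set.ofList (keys.map (fun k => PySem.Int.mod k 12))) [1, 5, 8] = true ∨
        PySem.Set.equal (PySem.Set.ofList (keys.map (fun k => PySem.Int.mod k 12))) [2, 6, 9] = true ∨
        PySem.Set.equal (PySem.Set.ofList (keys.map (fun k => PySem.Int.mod k 12))) [4, 8, 11] = true ∨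
        PySem.Set.equal (PySem.Set.ofList (keys.map (fun k => PySem.Int.mod k 12))) [3, 6, 10] = true) ↔
       Dcheck (canonPcs keys) = true
  rw [equal_congr _ _ [1, 5, 8] hmem, equal_congr _ _ [2, 6, 9] hmem,
      equal_congr _ _ [4, 8, 11] hmem, equal_congr _ _ [3, 6, 10] hmem]
  simp [Dcheck, or_assoc]

-- a strictly increasing list of elements drawn from a strictly increasing list is its sublist
lemma sublist_of_pairwise_subset :
    ∀ (l t : List Int), l.Pairwise (· < ·) → t.Pairwise (· < ·) → t ⊆ l → t.Sublist l := by
  intro l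
  induction l with
  | nil => intro t _ _ hsub; simp [List.subset_nil.mp hsub]
  | cons a l' ih =>
    intro t hl ht hsub
    cases t with
    | nil => exact List.nil_sublist _
    | cons b t' =>
      rcases List.pairwise_cons.mp hl with ⟨hal', hl'⟩
      rcases List.pairwise_cons.mp ht with ⟨hbt', ht'⟩
      by_cases hba : b = a
      · subst hba
        apply List.Sublist.cons₂
        apply ih t' hl' ht'
        intro x hx
        have hxl : x ∈ b :: l' := hsub (List.mem_cons_of_mem _ hx)
        rcases List.mem_cons.mp hxl with h | h
        · exact absurd (h ▸ hbt' x hx) (lt_irrefl x)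
        · exact h
      · apply List.Sublist.cons
        apply ih (b :: t') hl' ht
        intro x hx
        rcases List.mem_cons.mp (hsub hx) with h | h
        · subst h
          exfalso
          rcases List.mem_cons.mp hx with h' | h'
          · exact hba h'.symm
          · have h1 : b < x := hbt' x h'
            have h2 : x < b := by
              have hbl : b ∈ x :: l' := hsub (List.mem_cons_self)
              rcases List.mem_cons.mp hbl with h'' | h''
              · exact absurd (h'' ▸ h1) (lt_irrefl x)
              · exact hal' b h''
            exact absurd (h1.trans h2) (lt_irrefl b)
        · exact h

def range12 : List Int := [0, 1, 2, 3, 4, 5, 6, 7, 8, 9, 10, 11]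

set_option maxRecDepth 40000 in
set_option maxHeartbeats 4000000 in
lemma finCheck3 : (range12.sublists.filter (fun t => t.length == 3)).all triadCheck = true := by
  decide

lemma canon_nodup (keys : List Int) : (canonPcs keys).Nodup :=
  ((PySem.List.sorted_perm _ _ _).nodup_iff).mpr (PySem.Set.nodup_ofList _)

lemma equal_length {a : Type} [BEq a] [LawfulBEq a] {t s : List a} (ht : t.Nodup) (hs : s.Nodup)
    (h : PySem.Set.equal t s = true) : t.length = s.length := by
  rw [PySem.Set.equal_iff] at h
  exact ((List.perm_ext_iff_of_nodup ht hs).mpr h).length_eq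

lemma lookup_none_aux : ∀ (tbl : List (PySem.Set String × String)) (s : PySem.Set String),
    (∀ p ∈ tbl, (p.1 : List String).length = 3 ∧ p.1.Nodup) → s.Nodup → s.length ≠ 3 →
    lookupChord tbl s = none := by
  intro tbl
  induction tbl with
  | nil => intro s _ _ _; rfl
  | cons p rest ih =>
    intro s hk hs hlen
    obtain ⟨k, v⟩ := p
    have hkk := hk (k, v) (List.mem_cons_self)
    have hne : PySem.Set.equal k s = false := by
      rw [Bool.eq_false_iff]
      intro h
      exact hlen ((equal_length hkk.2 hs h).symm.trans hkk.1 ▸ rfl)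
    simp only [lookupChord, hne, Bool.false_eq_true, if_false]
    exact ih s (fun q hq => hk q (List.mem_cons_of_mem _ hq)) hs hlen

lemma noteName_inj : ∀ a ∈ range12, ∀ b ∈ range12, noteName a = noteName b → a = b := by decide

lemma Aof_invalid (t : List Int) (ht : t.Nodup) (hsub : t ⊆ range12) (hlen : t.length ≠ 3) :
    Aof t = "Invalid chord" := by
  have hmapnd : (t.map noteName).Nodup :=
    ht.map_on (fun x hx y hy h => noteName_inj x (hsub hx) y (hsub hy) h)
  have hof : PySem.Set.ofList (t.map noteName) = t.map noteName :=
    PySem.Set.ofList_eq_self_of_nodup _ hmapnd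
  have hkeys : ∀ p ∈ noteChordDict, (p.1 : List String).length = 3 ∧ p.1.Nodup := by decide
  unfold Aof
  rw [lookup_none_aux noteChordDict _ hkeys (PySem.Set.nodup_ofList _)
        (by rw [hof, List.length_map]; exact hlen)]

lemma Bof_invalid (t : List Int) (hlen : t.length ≠ 3) : Bof t = "Invalid chord" := by
  unfold Bof
  rw [if_neg]
  simp [hlen]

lemma Dcheck_false (t : List Int) (ht : t.Nodup) (hlen : t.length ≠ 3) : Dcheck t = false := by
  have key : ∀ s : List Int, s.Nodup → s.length = 3 → PySem.Set.equal t s = false := by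
    intro s hs h3
    rw [Bool.eq_false_iff]
    intro h
    exact hlen ((equal_length ht hs h).trans h3)
  unfold Dcheck
  rw [key [1, 5, 8] (by decide) rfl, key [2, 6, 9] (by decide) rfl,
      key [4, 8, 11] (by decide) rfl, key [3, 6, 10] (by decide) rfl]
  rfl

lemma canon_props (keys : List Int) :
    (canonPcs keys).Pairwise (· < ·) ∧ canonPcs keys ⊆ range12 := by
  constructor
  · exact PySem.List.sorted_ofList_pairwise_lt _
  · intro x hx
    simp only [canonPcs, PySem.List.mem_sorted, PySem.Set.mem_ofList, List.mem_map] at hx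
    obtain ⟨k, _, rfl⟩ := hx
    have h1 : 0 ≤ PySem.Int.mod k 12 := PySem.Int.mod_nonneg k (by norm_num)
    have h2 : PySem.Int.mod k 12 < 12 := PySem.Int.mod_lt k (by norm_num)
    set r := PySem.Int.mod k 12 with hr
    clear_value r
    interval_cases r <;> simp [range12]

lemma triad_of_keys (keys : List Int) : triadCheck (canonPcs keys) = true := by
  obtain ⟨hp, hsub⟩ := canon_props keys
  have hnd := canon_nodup keys
  by_cases hlen : (canonPcs keys).length = 3
  · have hr12 : range12.Pairwise (· < ·) := by decide
    have hsl : (canonPcs keys).Sublist range12 := sublist_of_pairwise_subset range12 _ hr12 hp hsub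
    have hmem : canonPcs keys ∈ range12.sublists.filter (fun t => t.length == 3) :=
      List.mem_filter.mpr ⟨List.mem_sublists.mpr hsl, by simp [hlen]⟩
    exact List.all_eq_true.mp finCheck3 _ hmem
  · unfold triadCheck
    rw [Aof_invalid _ hnd hsub hlen, Bof_invalid _ hlen, Dcheck_false _ hnd hlen]
    rfl

-- ===== VERDICT (by name: the statement is the Claim_ definition above) =====
theorem to_chord_spec : Claim_unchanged_to_chord := by
  intro keys _ hnD
  have h := triad_of_keys keys
  unfold triadCheck at h
  rw [(by rw [D_iff_Dcheck] at hnD; simp [Bool.not_eq_true] at hnD; rw [hnD] : Dcheck (canonPcs keys) = false)] at h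
  simp only [Bool.not_false, beq_iff_eq, decide_eq_true_eq] at h
  rw [to_chord_eq_Aof, to_chord_alt_eq, h]

theorem to_chord_changed : Claim_changed_to_chord := by unfold Claim_changed_to_chord; decide

theorem to_chord_tight : Claim_exact_to_chord := by
  intro keys _ hD
  have h := triad_of_keys keys
  unfold triadCheck at h
  rw [(D_iff_Dcheck keys).mp hD] at h
  simp only [Bool.not_true, beq_iff_eq, decide_eq_false_iff_not] at h
  rw [to_chord_eq_Aof, to_chord_alt_eq]
  exact h
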